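-- pv_equiv track=rewrite | github.com/Zenny00/AdventOfCode2023 | day1.py | getCalibration
-- ===== SOURCE A (Python) =====
-- def getCalibration(string):
--     first = -1
--     last = -1
--     for c in string:
--         if c.isdigit():
--             # We only adjust the first when it hasn't been changed
--             if first == -1:
--                 first = c
--             # Always adjust last
--             last = c
--
--     # Concat the two digits and return the value
--     return int(str(first)+str(last))
-- ===== SOURCE B (Python) =====
-- def getCalibration(string):
--     f = next(c for c in string if c.isdigit())
--     l = next(c for c in reversed(string) if c.isdigit())
--     return int(f + l)
-- ===== Notes on version B (the rewrite author's own statement) =====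
-- stated objective: simpler
-- what changed: Replaces A's single full pass maintaining first/last state with a -1 sentinel by two independent short-circuiting scans (front-to-back for the first digit, over reversed(string) for the last); Pre_ excludes digit-free strings, on which A raises ValueError (int() applied to the concatenated sentinels).
import Mathlib
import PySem

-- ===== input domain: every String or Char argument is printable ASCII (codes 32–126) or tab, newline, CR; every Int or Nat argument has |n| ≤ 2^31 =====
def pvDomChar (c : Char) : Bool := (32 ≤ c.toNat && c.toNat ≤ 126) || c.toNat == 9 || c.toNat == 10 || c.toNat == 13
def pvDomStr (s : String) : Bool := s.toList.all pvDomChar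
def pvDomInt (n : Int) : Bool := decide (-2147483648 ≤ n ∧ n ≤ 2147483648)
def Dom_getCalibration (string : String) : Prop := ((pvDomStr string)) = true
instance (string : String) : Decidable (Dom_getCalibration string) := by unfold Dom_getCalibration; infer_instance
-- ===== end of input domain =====

-- B replaces A's single stateful pass (first/last with a -1 sentinel) by two independent
-- short-circuiting scans: first digit front-to-back, first digit of the reversed string (objective: simpler).

-- ===== PORT A =====
-- state: (str(first), str(last)) — Python's first/last are -1 or a digit char; str() of either
def pvStepA (st : String × String) (c : Char) : String × String :=
  if PySem.Chars.isdigit c then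
    ((if st.1 = "-1" then String.ofList [c] else st.1), String.ofList [c])
  else st

def getCalibration (string : String) : Int :=
  let st := string.toList.foldl pvStepA ("-1", "-1")
  -- int(str(first)+str(last)); ValueError (no digit) is excluded by Pre_, getD 0 is unreachable there
  (PySem.Int.ofStr? (st.1 ++ st.2)).getD 0

-- ===== PORT B =====
def getCalibration_alt (string : String) : Int :=
  match string.toList.find? PySem.Chars.isdigit,
        string.toList.reverse.find? PySem.Chars.isdigit with
  | some f, some l => (PySem.Int.ofStr? (String.ofList [f] ++ String.ofList [l])).getD 0
  | _, _ => 0  -- unreachable under Pre_ (Python B's next() raises StopIteration here)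

-- ===== PRECONDITION & SPEC =====
-- Pre_ excludes strings with no digit: there A raises ValueError (int() of the concatenated -1 sentinels).
def Pre_getCalibration (string : String) : Prop := string.toList.any PySem.Chars.isdigit = true
instance (string : String) : Decidable (Pre_getCalibration string) := by unfold Pre_getCalibration; infer_instance
def pvWitness_getCalibration : String := "a1b2c"

def Spec_getCalibration (string : String) (out : Int) : Prop := out = getCalibration_alt string
instance (string : String) (out : Int) : Decidable (Spec_getCalibration string out) := by unfold Spec_getCalibration; infer_instance

-- ===== CLAIM (what is proved, stated in full; the proofs are below) =====
def Claim_equal_getCalibration : Prop := ∀ (string : String), Dom_getCalibration string → Pre_getCalibration string → Spec_getCalibration string (getCalibration string)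

-- ===== LEMMAS AND PROOFS =====

-- the 'last' component alone evolves like this fold; characterised by find? on the reverse
theorem pvLast_fold (l : List Char) (s0 : String) :
    l.foldl (fun s c => if PySem.Chars.isdigit c then String.ofList [c] else s) s0
      = match l.reverse.find? PySem.Chars.isdigit with
        | some d => String.ofList [d]
        | none => s0 := by
  induction l generalizing s0 with
  | nil => simp
  | cons c tl ih =>
    simp only [List.foldl_cons, List.reverse_cons, List.find?_append, ih]
    cases h : tl.reverse.find? PySem.Chars.isdigit with
    | some d => simp
    | none =>
      simp only [Option.none_or]
      by_cases hc : PySem.Chars.isdigit c <;> simp [List.find?, hc]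

-- once first is set (≠ "-1") it never changes, and last evolves as pvLast_fold's fold
theorem pvFold_after (l : List Char) (f0 s0 : String) (hf : f0 ≠ "-1") :
    l.foldl pvStepA (f0, s0)
      = (f0, l.foldl (fun s c => if PySem.Chars.isdigit c then String.ofList [c] else s) s0) := by
  induction l generalizing s0 with
  | nil => rfl
  | cons c tl ih =>
    simp only [List.foldl_cons, pvStepA]
    by_cases hc : PySem.Chars.isdigit c <;> simp [hc, hf, ih]

theorem pvFold_main (l : List Char) (f lst : Char)
    (hf : l.find? PySem.Chars.isdigit = some f)
    (hl : l.reverse.find? PySem.Chars.isdigit = some lst) :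
    l.foldl pvStepA ("-1", "-1") = (String.ofList [f], String.ofList [lst]) := by
  induction l with
  | nil => simp at hf
  | cons c tl ih =>
    by_cases hc : PySem.Chars.isdigit c
    · have hfc : c = f := by simpa [List.find?, hc] using hf
      subst hfc
      have h1 : pvStepA ("-1", "-1") c = (String.ofList [c], String.ofList [c]) := by
        simp [pvStepA, hc]
      rw [List.foldl_cons, h1, pvFold_after _ _ _ (by simp [String.ext_iff]), pvLast_fold]
      have hrev : ((c :: tl).reverse.find? PySem.Chars.isdigit)
          = (tl.reverse.find? PySem.Chars.isdigit).or (if PySem.Chars.isdigit c then some c else none) := by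
        simp only [List.reverse_cons, List.find?_append, List.find?]
        cases PySem.Chars.isdigit c <;> rfl
      cases h : tl.reverse.find? PySem.Chars.isdigit with
      | some d =>
        rw [hrev, h] at hl
        simp at hl
        simp [hl]
      | none =>
        rw [hrev, h] at hl
        simp [hc] at hl
        simp [hl]
    · have hf' : tl.find? PySem.Chars.isdigit = some f := by
        simpa [List.find?, hc] using hf
      have hl' : tl.reverse.find? PySem.Chars.isdigit = some lst := by
        rw [List.reverse_cons, List.find?_append] at hl
        cases h : tl.reverse.find? PySem.Chars.isdigit with
        | some d => rw [h] at hl; simpa using hl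
        | none => rw [h] at hl; simp [List.find?, hc] at hl
      have h1 : pvStepA ("-1", "-1") c = ("-1", "-1") := by simp [pvStepA, hc]
      rw [List.foldl_cons, h1]
      exact ih hf' hl'

-- ===== VERDICT (by name: the statement is the Claim_ definition above) =====
theorem getCalibration_spec : Claim_equal_getCalibration := by
  intro s _ hpre
  unfold Spec_getCalibration getCalibration getCalibration_alt
  have hany : s.toList.any PySem.Chars.isdigit = true := hpre
  obtain ⟨f, hf⟩ : ∃ f, s.toList.find? PySem.Chars.isdigit = some f := by
    rcases List.any_eq_true.mp hany with ⟨c, hc, hd⟩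
    exact Option.isSome_iff_exists.mp (List.find?_isSome.mpr ⟨c, hc, hd⟩)
  obtain ⟨l, hl⟩ : ∃ l, s.toList.reverse.find? PySem.Chars.isdigit = some l := by
    rcases List.any_eq_true.mp hany with ⟨c, hc, hd⟩
    exact Option.isSome_iff_exists.mp (List.find?_isSome.mpr ⟨c, by simpa using hc, hd⟩)
  rw [pvFold_main s.toList f l hf hl, hf, hl]
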